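-- pv_equiv track=rewrite | github.com/JasonFGC/Year1 | a4_Q2_300237438.py | two_length_run
-- ===== SOURCE A (Python) =====
-- def two_length_run(n):
--     '''
--     list of str - > int
--     finds the first run of length 2, stops the program when found and returns true. otherwise, returns false.
--     '''
--     x=0
--     i=0
--     while x==0:
--         if i<len(n)-1 and n[i]==n[i+1]:
--              x+=1
--         elif i==len(n):
--              x+=2
--         i+=1
--     if x==1:
--         return True
--     else:
--         return False
-- ===== SOURCE B (Python) =====
-- from itertools import groupby
--
-- def two_length_run(n):
--     # collapse n into maximal runs of equal adjacent elements;
--     # True iff some run has length >= 2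
--     return any(sum(1 for _ in g) >= 2 for _, g in groupby(n))
-- ===== Notes on version B (the rewrite author's own statement) =====
-- stated objective: idiomatic
-- what changed: Replaces the index-and-flag while loop with itertools.groupby: collapse the list into maximal runs of equal elements and return whether any run has length >= 2.
import Mathlib
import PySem

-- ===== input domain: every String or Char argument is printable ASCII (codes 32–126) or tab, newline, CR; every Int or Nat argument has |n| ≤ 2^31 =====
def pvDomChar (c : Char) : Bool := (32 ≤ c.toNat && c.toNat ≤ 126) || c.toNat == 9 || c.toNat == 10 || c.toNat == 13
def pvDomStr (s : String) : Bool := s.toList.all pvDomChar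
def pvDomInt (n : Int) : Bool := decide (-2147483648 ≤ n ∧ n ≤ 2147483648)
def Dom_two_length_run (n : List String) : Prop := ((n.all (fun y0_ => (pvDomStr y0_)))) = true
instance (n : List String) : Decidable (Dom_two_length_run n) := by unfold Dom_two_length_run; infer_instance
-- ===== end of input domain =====

-- B replaces A's index-and-flag while loop by a groupby-style decomposition into
-- maximal runs of equal elements, returning whether some run has length ≥ 2 (idiomatic).

-- ===== PORT A =====
-- the 'while x==0' loop; fuel only makes it total (the Python loop always stops
-- by the time i exceeds len(n), so fuel = len(n)+2 is never exhausted)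
def twoLengthRunLoop (n : List String) : Nat → Nat → Int → Int
  | 0, _, x => x
  | fuel + 1, i, x =>
    if x == 0 then
      if decide (i < n.length - 1) && decide (PySem.List.pyGet? n (i : Int) = PySem.List.pyGet? n ((i : Int) + 1)) then
        twoLengthRunLoop n fuel (i + 1) (x + 1)
      else if i == n.length then
        twoLengthRunLoop n fuel (i + 1) (x + 2)
      else
        twoLengthRunLoop n fuel (i + 1) x
    else x

def two_length_run (n : List String) : Bool :=
  let x := twoLengthRunLoop n (n.length + 2) 0 0
  if x == 1 then true else false

-- ===== PORT B =====
-- groupby: peel off the maximal run of the head element, return its length and the rest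
def splitRun (a : String) : List String → Nat × List String
  | [] => (0, [])
  | b :: bs => if b == a then let p := splitRun a bs; (p.1 + 1, p.2) else (0, b :: bs)

theorem splitRun_snd_length_le (a : String) (l : List String) :
    (splitRun a l).2.length ≤ l.length := by
  induction l with
  | nil => simp [splitRun]
  | cons b bs ih =>
    simp only [splitRun]
    split
    · exact le_trans ih (Nat.le_succ _)
    · simp

def two_length_run_alt : List String → Bool
  | [] => false
  | a :: rest =>
    let p := splitRun a rest
    if p.1 + 1 ≥ 2 then true else two_length_run_alt p.2
termination_by l => l.length
decreasing_by
  exact Nat.lt_succ_of_le (splitRun_snd_length_le a rest)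

-- ===== PRECONDITION & SPEC =====
def Spec_two_length_run (n : List String) (out : Bool) : Prop := out = two_length_run_alt n
instance (n : List String) (out : Bool) : Decidable (Spec_two_length_run n out) := by unfold Spec_two_length_run; infer_instance

-- ===== CLAIM (what is proved, stated in full; the proofs are below) =====
def Claim_equal_two_length_run : Prop := ∀ (n : List String), Dom_two_length_run n → Spec_two_length_run n (two_length_run n)

-- ===== LEMMAS AND PROOFS =====

-- bridge predicate: some adjacent pair of equal elements
def adjB : List String → Bool
  | a :: b :: t => (a == b) || adjB (b :: t)
  | _ => false

theorem alt_eq_adjB : ∀ l, two_length_run_alt l = adjB l := by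
  intro l
  induction hl : l.length using Nat.strong_induction_on generalizing l with
  | _ k ih =>
    subst hl
    match l with
    | [] => simp [two_length_run_alt, adjB]
    | [a] => simp [two_length_run_alt, splitRun, adjB]
    | a :: b :: t =>
      by_cases h : b = a
      · subst h
        simp [two_length_run_alt, splitRun, adjB]
      · have hba : (b == a) = false := by simp [h]
        have hab : (a == b) = false := by simp [Ne.symm h]
        simp only [two_length_run_alt, splitRun, hba, adjB, hab, Bool.false_or]
        exact ih (b :: t).length (by simp) (b :: t) rfl

theorem loop_ne_zero (n : List String) (fuel i : Nat) (x : Int) (hx : x ≠ 0) :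
    twoLengthRunLoop n fuel i x = x := by
  cases fuel with
  | zero => rfl
  | succ f => simp [twoLengthRunLoop, hx]

theorem loop_eq (n : List String) : ∀ fuel i, i ≤ n.length → n.length + 1 - i ≤ fuel →
    twoLengthRunLoop n fuel i 0 = if adjB (n.drop i) then 1 else 2 := by
  intro fuel
  induction fuel with
  | zero => intro i hi hf; omega
  | succ f ih =>
    intro i hi hf
    simp only [twoLengthRunLoop, beq_self_eq_true, if_true]
    by_cases hg : i < n.length - 1 ∧ PySem.List.pyGet? n (i : Int) = PySem.List.pyGet? n ((i : Int) + 1)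
    · obtain ⟨h1, h2⟩ := hg
      have hi1 : i + 1 < n.length := by omega
      have hii : i < n.length := by omega
      rw [if_pos (by simp [h1, h2])]
      rw [loop_ne_zero n f (i+1) (0+1) (by norm_num)]
      norm_num only
      have hget : n[i] = n[i+1] := by
        have e1 : PySem.List.pyGet? n (i : Int) = n[i]? := PySem.List.pyGet?_natCast n i
        have e2 : PySem.List.pyGet? n ((i : Int) + 1) = n[i+1]? := by
          have := PySem.List.pyGet?_natCast n (i+1)
          simpa [Nat.cast_add] using this
        rw [e1, e2, List.getElem?_eq_getElem hii, List.getElem?_eq_getElem hi1] at h2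
        exact Option.some.inj h2
      have hdrop : n.drop i = n[i] :: n.drop (i+1) := List.drop_eq_getElem_cons hii
      have hdrop2 : n.drop (i+1) = n[i+1] :: n.drop (i+2) := List.drop_eq_getElem_cons hi1
      rw [hdrop, hdrop2]
      simp [adjB, hget]
    · rw [if_neg (by
        intro hc
        apply hg
        simp only [Bool.and_eq_true, decide_eq_true_eq] at hc
        exact ⟨hc.1, hc.2⟩)]
      by_cases hie : i = n.length
      · rw [if_pos (by simp [hie])]
        rw [loop_ne_zero n f (i+1) (0+2) (by norm_num)]
        rw [hie, List.drop_length]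
        simp [adjB]
      · rw [if_neg (by simp [hie])]
        have hii : i < n.length := by omega
        rw [ih (i+1) (by omega) (by omega)]
        -- adjB (drop i) = adjB (drop (i+1)) under ¬guard
        have hdrop : n.drop i = n[i] :: n.drop (i+1) := List.drop_eq_getElem_cons hii
        by_cases h1 : i < n.length - 1
        · have hi1 : i + 1 < n.length := by omega
          have hne : n[i] ≠ n[i+1] := by
            intro he
            apply hg
            refine ⟨h1, ?_⟩
            have e1 : PySem.List.pyGet? n (i : Int) = n[i]? := PySem.List.pyGet?_natCast n i
            have e2 : PySem.List.pyGet? n ((i : Int) + 1) = n[i+1]? := by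
              have := PySem.List.pyGet?_natCast n (i+1)
              simpa [Nat.cast_add] using this
            rw [e1, e2, List.getElem?_eq_getElem hii, List.getElem?_eq_getElem hi1, he]
          have hdrop2 : n.drop (i+1) = n[i+1] :: n.drop (i+2) := List.drop_eq_getElem_cons hi1
          rw [hdrop, hdrop2]
          simp [adjB, hne]
        · -- i = n.length - 1 : drop i is a singleton
          have hlen : i + 1 = n.length := by omega
          have : n.drop (i+1) = [] := by rw [hlen, List.drop_length]
          rw [hdrop, this]
          simp [adjB]

-- ===== VERDICT (by name: the statement is the Claim_ definition above) =====
theorem two_length_run_spec : Claim_equal_two_length_run := by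
  intro n _
  unfold Spec_two_length_run two_length_run
  rw [loop_eq n (n.length + 2) 0 (Nat.zero_le _) (by omega), alt_eq_adjB]
  simp only [List.drop_zero]
  by_cases h : adjB n <;> simp [h]
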